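-- pv_equiv track=rewrite | github.com/alvarosc2000/python-full | code_test/suma_vecinos_matriz2.py | sumaV
-- ===== SOURCE A (Python) =====
-- def sumaV(matriz):
--     lista = []
--     for f in range(len(matriz)):
--         for c in range(len(matriz[0])):
--             suma = 0
--             if f > 0:
--                 suma += matriz[f-1][c]
--             if c > 0:
--                 suma += matriz[f][c-1]
--             if f < len(matriz)-1:
--                 suma += matriz[f+1][c]
--             if c < len(matriz[0])-1:
--                 suma += matriz[f][c+1]
--
--             lista.append(suma)
--     return lista
-- ===== SOURCE B (Python) =====
-- def sumaV(matriz):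
--     # Scatter ("push") algorithm: instead of gathering each cell's neighbours,
--     # every cell adds its own value into its neighbours' slots of a flat result.
--     if not matriz:
--         return []
--     h, w = len(matriz), len(matriz[0])
--     res = [0] * (h * w)
--     for f in range(h):
--         for c in range(w):
--             v = matriz[f][c]
--             if f > 0:
--                 res[(f - 1) * w + c] += v
--             if f < h - 1:
--                 res[(f + 1) * w + c] += v
--             if c > 0:
--                 res[f * w + c - 1] += v
--             if c < w - 1:
--                 res[f * w + c + 1] += v
--     return res
-- ===== Notes on version B (the rewrite author's own statement) =====
-- stated objective: alternative
-- what changed: B replaces A's gather (each cell reads its four neighbours under boundary guards) by a scatter: a flat h*w accumulator is allocated and every cell pushes its own value into its in-range neighbours' slots.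
import Mathlib
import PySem

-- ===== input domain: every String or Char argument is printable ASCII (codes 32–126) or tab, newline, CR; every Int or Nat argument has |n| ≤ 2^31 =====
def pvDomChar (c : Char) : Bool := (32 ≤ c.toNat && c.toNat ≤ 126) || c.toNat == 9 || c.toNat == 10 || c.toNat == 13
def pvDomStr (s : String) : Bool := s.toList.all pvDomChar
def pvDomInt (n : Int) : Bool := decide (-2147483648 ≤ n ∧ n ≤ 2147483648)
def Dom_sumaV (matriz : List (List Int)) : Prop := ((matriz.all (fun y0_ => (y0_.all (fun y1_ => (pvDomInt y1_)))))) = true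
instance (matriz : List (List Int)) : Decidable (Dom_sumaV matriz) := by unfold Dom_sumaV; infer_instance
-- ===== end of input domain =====

-- B replaces A's gather (each cell reads its neighbours under boundary guards) by a scatter: every cell pushes its value into its neighbours' slots of a flat accumulator (objective: alternative).


-- matriz[i][j] (total form; every use is guarded in range)
def pvGet2 (p : List (List Int)) (i j : Int) : Int :=
  PySem.List.pyGetD (PySem.List.pyGetD p i []) j 0

-- ===== PORT A =====
def sumaV (matriz : List (List Int)) : List Int :=
  (PySem.List.pyRange 0 matriz.length 1).foldl (fun lista f =>
    (PySem.List.pyRange 0 (PySem.List.pyGetD matriz 0 []).length 1).foldl (fun lista c =>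
      let suma : Int := 0
      let suma := if 0 < f then suma + pvGet2 matriz (f - 1) c else suma
      let suma := if 0 < c then suma + pvGet2 matriz f (c - 1) else suma
      let suma := if f < (matriz.length : Int) - 1 then suma + pvGet2 matriz (f + 1) c else suma
      let suma := if c < ((PySem.List.pyGetD matriz 0 []).length : Int) - 1 then suma + pvGet2 matriz f (c + 1) else suma
      lista ++ [suma]) lista) []

-- ===== PORT B =====
-- res[i] += v ; i is in range at every call site, so the i < 0 guard only totalises
def pvIncr (l : List Int) (i : Int) (v : Int) : List Int :=
  if i < 0 then l else l.modify i.toNat (· + v)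

def sumaV_alt (matriz : List (List Int)) : List Int :=
  if matriz = [] then [] else
  let h := matriz.length
  let w := (PySem.List.pyGetD matriz 0 []).length
  let res := List.replicate (h * w) (0 : Int)
  (PySem.List.pyRange 0 h 1).foldl (fun res f =>
    (PySem.List.pyRange 0 w 1).foldl (fun res c =>
      let v := pvGet2 matriz f c
      let res := if 0 < f then pvIncr res ((f - 1) * w + c) v else res
      let res := if f < (h : Int) - 1 then pvIncr res ((f + 1) * w + c) v else res
      let res := if 0 < c then pvIncr res (f * w + c - 1) v else res
      let res := if c < (w : Int) - 1 then pvIncr res (f * w + c + 1) v else res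
      res) res) res

-- ===== PRECONDITION & SPEC =====
-- Pre_ excludes exactly the ragged matrices with a row shorter than row 0, on which Python A raises IndexError (and Python B does too).
def Pre_sumaV (matriz : List (List Int)) : Prop :=
  ∀ fila ∈ matriz, (matriz.getD 0 []).length ≤ fila.length
instance (matriz : List (List Int)) : Decidable (Pre_sumaV matriz) := by unfold Pre_sumaV; infer_instance

def pvWitness_sumaV : List (List Int) := [[1, 2], [3, 4]]

def Spec_sumaV (matriz : List (List Int)) (out : List Int) : Prop := out = sumaV_alt matriz
instance (matriz : List (List Int)) (out : List Int) : Decidable (Spec_sumaV matriz out) := by unfold Spec_sumaV; infer_instance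

-- ===== CLAIM (what is proved, stated in full; the proofs are below) =====
def Claim_equal_sumaV : Prop := ∀ (matriz : List (List Int)), Dom_sumaV matriz → Pre_sumaV matriz → Spec_sumaV matriz (sumaV matriz)

-- ===== LEMMAS AND PROOFS =====

-- value of cell (f, c)
def pvV (m : List (List Int)) (f c : Nat) : Int := pvGet2 m (f : Int) (c : Int)

-- the list of (flat index, value) updates cell (f, c) performs in B
def pvUpd (m : List (List Int)) (h w : Nat) (f c : Nat) : List (Int × Int) :=
  (if 0 < f then [(((f : Int) - 1) * (w : Int) + (c : Int), pvV m f c)] else []) ++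
  ((if f + 1 < h then [(((f : Int) + 1) * (w : Int) + (c : Int), pvV m f c)] else []) ++
  ((if 0 < c then [((f : Int) * (w : Int) + (c : Int) - 1, pvV m f c)] else []) ++
  (if c + 1 < w then [((f : Int) * (w : Int) + (c : Int) + 1, pvV m f c)] else [])))

def pvApply (U : List (Int × Int)) (l : List Int) : List Int :=
  U.foldl (fun r p => pvIncr r p.1 p.2) l

-- A's per-cell gather expression
def pvGA (m : List (List Int)) (f c : Nat) : Int :=
  let suma : Int := 0
  let suma := if 0 < ((f : Nat) : Int) then suma + pvGet2 m ((f : Int) - 1) (c : Int) else suma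
  let suma := if 0 < ((c : Nat) : Int) then suma + pvGet2 m (f : Int) ((c : Int) - 1) else suma
  let suma := if ((f : Nat) : Int) < (m.length : Int) - 1 then suma + pvGet2 m ((f : Int) + 1) (c : Int) else suma
  let suma := if ((c : Nat) : Int) < ((PySem.List.pyGetD m 0 []).length : Int) - 1 then suma + pvGet2 m (f : Int) ((c : Int) + 1) else suma
  suma

theorem foldl_flatMap_acc {α β γ : Type} (l : List α) (g : α → List β) (step : γ → β → γ) (init : γ) :
    (l.flatMap g).foldl step init = l.foldl (fun r a => (g a).foldl step r) init := by
  induction l generalizing init with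
  | nil => rfl
  | cons a t ih => simp [List.flatMap_cons, List.foldl_append, ih]

theorem length_pvIncr (l : List Int) (i v : Int) : (pvIncr l i v).length = l.length := by
  unfold pvIncr; split <;> simp

theorem getD_pvIncr (l : List Int) (i : Int) (v : Int) (j : Nat)
    (h0 : 0 ≤ i) (h1 : i < (l.length : Int)) :
    (pvIncr l i v).getD j 0 = l.getD j 0 + (if i = (j : Int) then v else 0) := by
  unfold pvIncr
  rw [if_neg (by omega)]
  by_cases hij : i.toNat = j
  · have hj : j < l.length := by omega
    have hiv : i = (j : Int) := by omega
    rw [if_pos hiv]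
    simp only [List.getD_eq_getElem?_getD, List.getElem?_modify, hij,
      List.getElem?_eq_getElem hj]
    simp
  · have hiv : ¬ i = (j : Int) := by omega
    rw [if_neg hiv]
    simp only [List.getD_eq_getElem?_getD, List.getElem?_modify, hij]
    simp

theorem pvApply_length (U : List (Int × Int)) (l : List Int) : (pvApply U l).length = l.length := by
  induction U generalizing l with
  | nil => rfl
  | cons p t ih => simpa [pvApply, length_pvIncr] using ih (pvIncr l p.1 p.2)

theorem pvApply_getD (U : List (Int × Int)) (l : List Int) (j : Nat)
    (hU : ∀ p ∈ U, 0 ≤ p.1 ∧ p.1 < (l.length : Int)) :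
    (pvApply U l).getD j 0
      = l.getD j 0 + (U.map (fun p => if p.1 = (j : Int) then p.2 else 0)).sum := by
  induction U generalizing l with
  | nil => simp [pvApply]
  | cons p t ih =>
    obtain ⟨h0, h1⟩ := hU p (by simp)
    have hrest : ∀ q ∈ t, 0 ≤ q.1 ∧ q.1 < ((pvIncr l p.1 p.2).length : Int) := by
      intro q hq
      have := hU q (by simp [hq])
      simpa [length_pvIncr] using this
    rw [show pvApply (p :: t) l = pvApply t (pvIncr l p.1 p.2) from rfl, ih _ hrest,
        getD_pvIncr l p.1 p.2 j h0 h1]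
    simp only [List.map_cons, List.sum_cons]
    ring

theorem idx_lt {a c h w : Nat} (ha : a < h) (hc : c < w) : a * w + c < h * w := by
  have h1 : (a + 1) * w ≤ h * w := Nat.mul_le_mul (by omega) (le_refl w)
  have h2 : (a + 1) * w = a * w + w := by ring
  omega

theorem cell_eq {a b c d w : Nat} (hc : c < w) (hd : d < w) :
    a * w + c = b * w + d ↔ a = b ∧ c = d := by
  constructor
  · intro e
    have hw : 0 < w := by omega
    have h1 : (a * w + c) / w = a := by
      rw [Nat.mul_comm a w, Nat.mul_add_div hw, Nat.div_eq_of_lt hc]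
      omega
    have h2 : (a * w + c) % w = c := by
      rw [Nat.mul_comm a w, Nat.mul_add_mod, Nat.mod_eq_of_lt hc]
    have h3 : (b * w + d) / w = b := by
      rw [Nat.mul_comm b w, Nat.mul_add_div hw, Nat.div_eq_of_lt hd]
      omega
    have h4 : (b * w + d) % w = d := by
      rw [Nat.mul_comm b w, Nat.mul_add_mod, Nat.mod_eq_of_lt hd]
    rw [e] at h1 h2
    omega
  · rintro ⟨rfl, rfl⟩; rfl

theorem upd_bounds (m : List (List Int)) (h w f c : Nat) (hf : f < h) (hc : c < w) :
    ∀ p ∈ pvUpd m h w f c, 0 ≤ p.1 ∧ p.1 < ((h * w : Nat) : Int) := by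
  intro p hp
  have key : ∀ (a c' : Nat), a < h → c' < w →
      0 ≤ ((a * w + c' : Nat) : Int) ∧ ((a * w + c' : Nat) : Int) < ((h * w : Nat) : Int) :=
    fun a c' ha hc' => ⟨Int.natCast_nonneg _, by exact_mod_cast idx_lt ha hc'⟩
  simp only [pvUpd, List.mem_append, List.mem_ite_nil_right, List.mem_singleton] at hp
  rcases hp with ⟨hg, rfl⟩ | ⟨hg, rfl⟩ | ⟨hg, rfl⟩ | ⟨hg, rfl⟩
  · have e : ((f : Int) - 1) * (w : Int) + (c : Int) = (((f - 1) * w + c : Nat) : Int) := by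
      push_cast [Nat.cast_sub (show 1 ≤ f by omega)]; ring
    dsimp only
    rw [e]
    exact key (f - 1) c (by omega) hc
  · have e : ((f : Int) + 1) * (w : Int) + (c : Int) = (((f + 1) * w + c : Nat) : Int) := by
      push_cast; ring
    dsimp only
    rw [e]
    exact key (f + 1) c (by omega) hc
  · have e : (f : Int) * (w : Int) + (c : Int) - 1 = ((f * w + (c - 1) : Nat) : Int) := by
      push_cast [Nat.cast_sub (show 1 ≤ c by omega)]; ring
    dsimp only
    rw [e]
    exact key f (c - 1) hf (by omega)
  · have e : (f : Int) * (w : Int) + (c : Int) + 1 = ((f * w + (c + 1) : Nat) : Int) := by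
      push_cast; ring
    dsimp only
    rw [e]
    exact key f (c + 1) hf hg

theorem s_eval (m : List (List Int)) (h w f0 c0 f c : Nat)
    (hf0 : f0 < h) (hc0 : c0 < w) (hc : c < w) :
    ((pvUpd m h w f c).map (fun p => if p.1 = ((f0 * w + c0 : Nat) : Int) then p.2 else 0)).sum
    = (if f = f0 + 1 ∧ c = c0 then pvV m f c else 0)
    + ((if 0 < f0 ∧ f = f0 - 1 ∧ c = c0 then pvV m f c else 0)
    + ((if f = f0 ∧ c = c0 + 1 then pvV m f c else 0)
    + (if 0 < c0 ∧ f = f0 ∧ c = c0 - 1 then pvV m f c else 0))) := by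
  have t1 : (((if 0 < f then [(((f : Int) - 1) * (w : Int) + (c : Int), pvV m f c)] else []) : List (Int × Int)).map
        (fun p => if p.1 = ((f0 * w + c0 : Nat) : Int) then p.2 else 0)).sum
      = (if f = f0 + 1 ∧ c = c0 then pvV m f c else 0) := by
    by_cases hg : 0 < f
    · have dec : (((f : Int) - 1) * (w : Int) + (c : Int) = ((f0 * w + c0 : Nat) : Int)) ↔ (f = f0 + 1 ∧ c = c0) := by
        rw [show ((f : Int) - 1) * (w : Int) + (c : Int) = (((f - 1) * w + c : Nat) : Int) by
              push_cast [Nat.cast_sub (show 1 ≤ f by omega)]; ring,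
            Nat.cast_inj, cell_eq hc hc0]
        omega
      simp only [hg, if_true, List.map_cons, List.map_nil, List.sum_cons, List.sum_nil, add_zero]
      exact if_congr dec rfl rfl
    · have hne : ¬ (f = f0 + 1 ∧ c = c0) := by omega
      simp [hg, hne]
  have t2 : (((if f + 1 < h then [(((f : Int) + 1) * (w : Int) + (c : Int), pvV m f c)] else []) : List (Int × Int)).map
        (fun p => if p.1 = ((f0 * w + c0 : Nat) : Int) then p.2 else 0)).sum
      = (if 0 < f0 ∧ f = f0 - 1 ∧ c = c0 then pvV m f c else 0) := by
    by_cases hg : f + 1 < h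
    · have dec : (((f : Int) + 1) * (w : Int) + (c : Int) = ((f0 * w + c0 : Nat) : Int)) ↔ (0 < f0 ∧ f = f0 - 1 ∧ c = c0) := by
        rw [show ((f : Int) + 1) * (w : Int) + (c : Int) = (((f + 1) * w + c : Nat) : Int) by push_cast; ring,
            Nat.cast_inj, cell_eq hc hc0]
        omega
      simp only [hg, if_true, List.map_cons, List.map_nil, List.sum_cons, List.sum_nil, add_zero]
      exact if_congr dec rfl rfl
    · have hne : ¬ (0 < f0 ∧ f = f0 - 1 ∧ c = c0) := by omega
      simp [hg, hne]
  have t3 : (((if 0 < c then [((f : Int) * (w : Int) + (c : Int) - 1, pvV m f c)] else []) : List (Int × Int)).map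
        (fun p => if p.1 = ((f0 * w + c0 : Nat) : Int) then p.2 else 0)).sum
      = (if f = f0 ∧ c = c0 + 1 then pvV m f c else 0) := by
    by_cases hg : 0 < c
    · have dec : ((f : Int) * (w : Int) + (c : Int) - 1 = ((f0 * w + c0 : Nat) : Int)) ↔ (f = f0 ∧ c = c0 + 1) := by
        rw [show (f : Int) * (w : Int) + (c : Int) - 1 = ((f * w + (c - 1) : Nat) : Int) by
              push_cast [Nat.cast_sub (show 1 ≤ c by omega)]; ring,
            Nat.cast_inj, cell_eq (show c - 1 < w by omega) hc0]
        omega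
      simp only [hg, if_true, List.map_cons, List.map_nil, List.sum_cons, List.sum_nil, add_zero]
      exact if_congr dec rfl rfl
    · have hne : ¬ (f = f0 ∧ c = c0 + 1) := by omega
      simp [hg, hne]
  have t4 : (((if c + 1 < w then [((f : Int) * (w : Int) + (c : Int) + 1, pvV m f c)] else []) : List (Int × Int)).map
        (fun p => if p.1 = ((f0 * w + c0 : Nat) : Int) then p.2 else 0)).sum
      = (if 0 < c0 ∧ f = f0 ∧ c = c0 - 1 then pvV m f c else 0) := by
    by_cases hg : c + 1 < w
    · have dec : ((f : Int) * (w : Int) + (c : Int) + 1 = ((f0 * w + c0 : Nat) : Int)) ↔ (0 < c0 ∧ f = f0 ∧ c = c0 - 1) := by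
        rw [show (f : Int) * (w : Int) + (c : Int) + 1 = ((f * w + (c + 1) : Nat) : Int) by push_cast; ring,
            Nat.cast_inj, cell_eq hg hc0]
        omega
      simp only [hg, if_true, List.map_cons, List.map_nil, List.sum_cons, List.sum_nil, add_zero]
      exact if_congr dec rfl rfl
    · have hne : ¬ (0 < c0 ∧ f = f0 ∧ c = c0 - 1) := by omega
      simp [hg, hne]
  simp only [pvUpd, List.map_append, List.sum_append]
  rw [t1, t2, t3, t4]

theorem sum_map_range (n : Nat) (g : Nat → Int) :
    ((List.range n).map g).sum = ∑ i ∈ Finset.range n, g i := by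
  induction n with
  | zero => simp
  | succ n ih => rw [List.range_succ, List.map_append, List.sum_append, Finset.sum_range_succ, ih]; simp

theorem sum_flatMap_int {α : Type} (l : List α) (g : α → List Int) :
    (l.flatMap g).sum = (l.map (fun a => (g a).sum)).sum := by
  induction l with
  | nil => rfl
  | cons a t ih => simp [List.flatMap_cons, List.sum_append, ih]

theorem row_sum (m : List (List Int)) (h w f0 c0 f : Nat) (hf0 : f0 < h) (hc0 : c0 < w) :
    (∑ c ∈ Finset.range w,
      ((if f = f0 + 1 ∧ c = c0 then pvV m f c else 0)
      + ((if 0 < f0 ∧ f = f0 - 1 ∧ c = c0 then pvV m f c else 0)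
      + ((if f = f0 ∧ c = c0 + 1 then pvV m f c else 0)
      + (if 0 < c0 ∧ f = f0 ∧ c = c0 - 1 then pvV m f c else 0)))))
    = (if f = f0 + 1 then pvV m f c0 else 0)
    + ((if 0 < f0 ∧ f = f0 - 1 then pvV m f c0 else 0)
    + ((if f = f0 ∧ c0 + 1 < w then pvV m f (c0 + 1) else 0)
    + (if 0 < c0 ∧ f = f0 then pvV m f (c0 - 1) else 0))) := by
  rw [Finset.sum_add_distrib, Finset.sum_add_distrib, Finset.sum_add_distrib]
  have e1 : (∑ c ∈ Finset.range w, (if f = f0 + 1 ∧ c = c0 then pvV m f c else 0))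
      = (if f = f0 + 1 then pvV m f c0 else 0) := by
    rw [Finset.sum_congr rfl (fun c _ =>
          show _ = (if c = c0 then (if f = f0 + 1 then pvV m f c else 0) else 0) by
            split_ifs <;> tauto),
        Finset.sum_ite_eq' (Finset.range w) c0 (fun c => if f = f0 + 1 then pvV m f c else 0)]
    simp [Finset.mem_range.mpr hc0]
  have e2 : (∑ c ∈ Finset.range w, (if 0 < f0 ∧ f = f0 - 1 ∧ c = c0 then pvV m f c else 0))
      = (if 0 < f0 ∧ f = f0 - 1 then pvV m f c0 else 0) := by
    rw [Finset.sum_congr rfl (fun c _ =>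
          show _ = (if c = c0 then (if 0 < f0 ∧ f = f0 - 1 then pvV m f c else 0) else 0) by
            split_ifs <;> tauto),
        Finset.sum_ite_eq' (Finset.range w) c0 (fun c => if 0 < f0 ∧ f = f0 - 1 then pvV m f c else 0)]
    simp [Finset.mem_range.mpr hc0]
  have e3 : (∑ c ∈ Finset.range w, (if f = f0 ∧ c = c0 + 1 then pvV m f c else 0))
      = (if f = f0 ∧ c0 + 1 < w then pvV m f (c0 + 1) else 0) := by
    rw [Finset.sum_congr rfl (fun c _ =>
          show _ = (if c = c0 + 1 then (if f = f0 then pvV m f c else 0) else 0) by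
            split_ifs <;> tauto),
        Finset.sum_ite_eq' (Finset.range w) (c0 + 1) (fun c => if f = f0 then pvV m f c else 0)]
    simp only [Finset.mem_range]
    split_ifs <;> tauto
  have e4 : (∑ c ∈ Finset.range w, (if 0 < c0 ∧ f = f0 ∧ c = c0 - 1 then pvV m f c else 0))
      = (if 0 < c0 ∧ f = f0 then pvV m f (c0 - 1) else 0) := by
    rw [Finset.sum_congr rfl (fun c _ =>
          show _ = (if c = c0 - 1 then (if 0 < c0 ∧ f = f0 then pvV m f c else 0) else 0) by
            split_ifs <;> first | rfl | omega | tauto),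
        Finset.sum_ite_eq' (Finset.range w) (c0 - 1) (fun c => if 0 < c0 ∧ f = f0 then pvV m f c else 0)]
    simp [Finset.mem_range.mpr (show c0 - 1 < w by omega)]
  rw [e1, e2, e3, e4]

theorem col_sum (m : List (List Int)) (h w f0 c0 : Nat) (hf0 : f0 < h) (hc0 : c0 < w) :
    (∑ f ∈ Finset.range h,
      ((if f = f0 + 1 then pvV m f c0 else 0)
      + ((if 0 < f0 ∧ f = f0 - 1 then pvV m f c0 else 0)
      + ((if f = f0 ∧ c0 + 1 < w then pvV m f (c0 + 1) else 0)
      + (if 0 < c0 ∧ f = f0 then pvV m f (c0 - 1) else 0)))))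
    = (if f0 + 1 < h then pvV m (f0 + 1) c0 else 0)
    + ((if 0 < f0 then pvV m (f0 - 1) c0 else 0)
    + ((if c0 + 1 < w then pvV m f0 (c0 + 1) else 0)
    + (if 0 < c0 then pvV m f0 (c0 - 1) else 0))) := by
  rw [Finset.sum_add_distrib, Finset.sum_add_distrib, Finset.sum_add_distrib]
  have e1 : (∑ f ∈ Finset.range h, (if f = f0 + 1 then pvV m f c0 else 0))
      = (if f0 + 1 < h then pvV m (f0 + 1) c0 else 0) := by
    rw [Finset.sum_ite_eq' (Finset.range h) (f0 + 1) (fun f => pvV m f c0)]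
    simp [Finset.mem_range]
  have e2 : (∑ f ∈ Finset.range h, (if 0 < f0 ∧ f = f0 - 1 then pvV m f c0 else 0))
      = (if 0 < f0 then pvV m (f0 - 1) c0 else 0) := by
    rw [Finset.sum_congr rfl (fun f _ =>
          show _ = (if f = f0 - 1 then (if 0 < f0 then pvV m f c0 else 0) else 0) by
            split_ifs <;> tauto),
        Finset.sum_ite_eq' (Finset.range h) (f0 - 1) (fun f => if 0 < f0 then pvV m f c0 else 0)]
    simp [Finset.mem_range.mpr (show f0 - 1 < h by omega)]
  have e3 : (∑ f ∈ Finset.range h, (if f = f0 ∧ c0 + 1 < w then pvV m f (c0 + 1) else 0))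
      = (if c0 + 1 < w then pvV m f0 (c0 + 1) else 0) := by
    rw [Finset.sum_congr rfl (fun f _ =>
          show _ = (if f = f0 then (if c0 + 1 < w then pvV m f (c0 + 1) else 0) else 0) by
            split_ifs <;> tauto),
        Finset.sum_ite_eq' (Finset.range h) f0 (fun f => if c0 + 1 < w then pvV m f (c0 + 1) else 0)]
    simp [Finset.mem_range.mpr hf0]
  have e4 : (∑ f ∈ Finset.range h, (if 0 < c0 ∧ f = f0 then pvV m f (c0 - 1) else 0))
      = (if 0 < c0 then pvV m f0 (c0 - 1) else 0) := by
    rw [Finset.sum_congr rfl (fun f _ =>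
          show _ = (if f = f0 then (if 0 < c0 then pvV m f (c0 - 1) else 0) else 0) by
            split_ifs <;> tauto),
        Finset.sum_ite_eq' (Finset.range h) f0 (fun f => if 0 < c0 then pvV m f (c0 - 1) else 0)]
    simp [Finset.mem_range.mpr hf0]
  rw [e1, e2, e3, e4]

theorem getD_replicate_zero (k j : Nat) : (List.replicate k (0 : Int)).getD j 0 = 0 := by
  simp only [List.getD, List.getElem?_replicate]
  split <;> rfl

-- B's result characterised cell by cell
theorem B_getD (m : List (List Int)) (h w f0 c0 : Nat) (hf0 : f0 < h) (hc0 : c0 < w) :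
    (pvApply ((List.range h).flatMap (fun f => (List.range w).flatMap (pvUpd m h w f)))
        (List.replicate (h * w) 0)).getD (f0 * w + c0) 0
    = (if f0 + 1 < h then pvV m (f0 + 1) c0 else 0)
    + ((if 0 < f0 then pvV m (f0 - 1) c0 else 0)
    + ((if c0 + 1 < w then pvV m f0 (c0 + 1) else 0)
    + (if 0 < c0 then pvV m f0 (c0 - 1) else 0))) := by
  have hb : ∀ p ∈ (List.range h).flatMap (fun f => (List.range w).flatMap (pvUpd m h w f)),
      0 ≤ p.1 ∧ p.1 < ((List.replicate (h * w) (0 : Int)).length : Int) := by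
    intro p hp
    simp only [List.mem_flatMap, List.mem_range] at hp
    obtain ⟨f, hf, c, hc, hpc⟩ := hp
    have := upd_bounds m h w f c hf hc p hpc
    simpa [List.length_replicate] using this
  rw [pvApply_getD _ _ _ hb, getD_replicate_zero, List.map_flatMap, sum_flatMap_int, sum_map_range,
      zero_add]
  calc (∑ f ∈ Finset.range h,
          (((List.range w).flatMap (pvUpd m h w f)).map
            (fun p => if p.1 = ((f0 * w + c0 : Nat) : Int) then p.2 else 0)).sum)
      = ∑ f ∈ Finset.range h, ∑ c ∈ Finset.range w,
          ((pvUpd m h w f c).map (fun p => if p.1 = ((f0 * w + c0 : Nat) : Int) then p.2 else 0)).sum :=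
        Finset.sum_congr rfl (fun f _ => by rw [List.map_flatMap, sum_flatMap_int, sum_map_range])
    _ = ∑ f ∈ Finset.range h, ∑ c ∈ Finset.range w,
          ((if f = f0 + 1 ∧ c = c0 then pvV m f c else 0)
          + ((if 0 < f0 ∧ f = f0 - 1 ∧ c = c0 then pvV m f c else 0)
          + ((if f = f0 ∧ c = c0 + 1 then pvV m f c else 0)
          + (if 0 < c0 ∧ f = f0 ∧ c = c0 - 1 then pvV m f c else 0)))) :=
        Finset.sum_congr rfl (fun f _ => Finset.sum_congr rfl (fun c hcm =>
          s_eval m h w f0 c0 f c hf0 hc0 (Finset.mem_range.mp hcm)))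
    _ = ∑ f ∈ Finset.range h,
          ((if f = f0 + 1 then pvV m f c0 else 0)
          + ((if 0 < f0 ∧ f = f0 - 1 then pvV m f c0 else 0)
          + ((if f = f0 ∧ c0 + 1 < w then pvV m f (c0 + 1) else 0)
          + (if 0 < c0 ∧ f = f0 then pvV m f (c0 - 1) else 0)))) :=
        Finset.sum_congr rfl (fun f _ => row_sum m h w f0 c0 f hf0 hc0)
    _ = _ := col_sum m h w f0 c0 hf0 hc0

-- one iteration of B's inner loop is exactly the application of that cell's update list
theorem stepEq (m : List (List Int)) (h w f c : Nat) (res : List Int) :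
    (let v := pvGet2 m ((f : Nat) : Int) ((c : Nat) : Int)
     let r1 := if 0 < ((f : Nat) : Int) then
       pvIncr res ((((f : Nat) : Int) - 1) * ((w : Nat) : Int) + ((c : Nat) : Int)) v else res
     let r2 := if ((f : Nat) : Int) < ((h : Nat) : Int) - 1 then
       pvIncr r1 ((((f : Nat) : Int) + 1) * ((w : Nat) : Int) + ((c : Nat) : Int)) v else r1
     let r3 := if 0 < ((c : Nat) : Int) then
       pvIncr r2 (((f : Nat) : Int) * ((w : Nat) : Int) + ((c : Nat) : Int) - 1) v else r2
     let r4 := if ((c : Nat) : Int) < ((w : Nat) : Int) - 1 then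
       pvIncr r3 (((f : Nat) : Int) * ((w : Nat) : Int) + ((c : Nat) : Int) + 1) v else r3
     r4)
    = (pvUpd m h w f c).foldl (fun r p => pvIncr r p.1 p.2) res := by
  simp only [pvUpd, pvV, List.foldl_append,
      show (0 < ((f : Nat) : Int)) ↔ (0 < f) from by omega,
      show (((f : Nat) : Int) < ((h : Nat) : Int) - 1) ↔ (f + 1 < h) from by omega,
      show (0 < ((c : Nat) : Int)) ↔ (0 < c) from by omega,
      show (((c : Nat) : Int) < ((w : Nat) : Int) - 1) ↔ (c + 1 < w) from by omega]
  split_ifs <;> rfl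

-- B's fold is the scatter of all per-cell updates
theorem altEq (m : List (List Int)) (hm : m ≠ []) :
    sumaV_alt m = pvApply
      ((List.range m.length).flatMap (fun f =>
        (List.range (PySem.List.pyGetD m 0 []).length).flatMap
          (pvUpd m m.length (PySem.List.pyGetD m 0 []).length f)))
      (List.replicate (m.length * (PySem.List.pyGetD m 0 []).length) 0) := by
  simp only [sumaV_alt, if_neg hm, PySem.List.pyRange_zero_nat, List.foldl_map]
  unfold pvApply
  rw [foldl_flatMap_acc]
  apply List.foldl_ext
  intro res f _
  rw [foldl_flatMap_acc]
  apply List.foldl_ext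
  intro res' c _
  exact stepEq m m.length (PySem.List.pyGetD m 0 []).length f c res'

-- A's fold is the gather grid, flattened
theorem aEq (m : List (List Int)) :
    sumaV m = (List.range m.length).flatMap (fun f =>
      (List.range (PySem.List.pyGetD m 0 []).length).map (pvGA m f)) := by
  simp only [sumaV, PySem.List.foldl_append_singleton_eq_map, PySem.List.foldl_append_eq_flatMap,
    List.nil_append, PySem.List.pyRange_zero_nat, List.flatMap_map, List.map_map]
  rfl

theorem grid_length (G : Nat → Nat → Int) (h w : Nat) :
    ((List.range h).flatMap (fun f => (List.range w).map (G f))).length = h * w := by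
  simp [List.length_flatMap, List.map_const', List.sum_replicate, smul_eq_mul]

theorem grid_getD (G : Nat → Nat → Int) (h w f c : Nat) (hf : f < h) (hc : c < w) :
    ((List.range h).flatMap (fun f => (List.range w).map (G f))).getD (f * w + c) 0 = G f c := by
  induction h with
  | zero => omega
  | succ n ih =>
    rw [List.range_succ, List.flatMap_append, List.flatMap_singleton]
    have hlen : ((List.range n).flatMap (fun f => (List.range w).map (G f))).length = n * w :=
      grid_length G n w
    rcases Nat.lt_or_ge f n with h1 | h1
    · rw [List.getD_eq_getElem?_getD,
          List.getElem?_append_left (by rw [hlen]; exact idx_lt h1 hc),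
          ← List.getD_eq_getElem?_getD, ih h1]
    · have hf' : f = n := by omega
      subst hf'
      rw [List.getD_eq_getElem?_getD,
          List.getElem?_append_right (by rw [hlen]; exact Nat.le_add_right _ _), hlen,
          Nat.add_sub_cancel_left]
      simp [List.getElem?_map, List.getElem?_range hc]

theorem cell_match (m : List (List Int)) (f0 c0 : Nat)
    (hf0 : f0 < m.length) (hc0 : c0 < (PySem.List.pyGetD m 0 []).length) :
    pvGA m f0 c0
    = (if f0 + 1 < m.length then pvV m (f0 + 1) c0 else 0)
    + ((if 0 < f0 then pvV m (f0 - 1) c0 else 0)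
    + ((if c0 + 1 < (PySem.List.pyGetD m 0 []).length then pvV m f0 (c0 + 1) else 0)
    + (if 0 < c0 then pvV m f0 (c0 - 1) else 0))) := by
  unfold pvGA pvV
  simp only [show (0 < ((f0 : Nat) : Int)) ↔ (0 < f0) from by omega,
      show (0 < ((c0 : Nat) : Int)) ↔ (0 < c0) from by omega,
      show (((f0 : Nat) : Int) < (m.length : Int) - 1) ↔ (f0 + 1 < m.length) from by omega,
      show (((c0 : Nat) : Int) < ((PySem.List.pyGetD m 0 []).length : Int) - 1)
          ↔ (c0 + 1 < (PySem.List.pyGetD m 0 []).length) from by omega]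
  by_cases h1 : 0 < f0 <;> by_cases h2 : 0 < c0 <;>
    by_cases h3 : f0 + 1 < m.length <;>
    by_cases h4 : c0 + 1 < (PySem.List.pyGetD m 0 []).length <;>
    simp only [h1, h2, h3, h4, if_true, if_false, zero_add, add_zero] <;>
    (try rw [show ((f0 - 1 : Nat) : Int) = ((f0 : Nat) : Int) - 1 by omega]) <;>
    (try rw [show ((c0 - 1 : Nat) : Int) = ((c0 : Nat) : Int) - 1 by omega]) <;>
    (try rw [show ((f0 + 1 : Nat) : Int) = ((f0 : Nat) : Int) + 1 by push_cast; ring]) <;>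
    (try rw [show ((c0 + 1 : Nat) : Int) = ((c0 : Nat) : Int) + 1 by push_cast; ring]) <;>
    ring

-- ===== VERDICT (by name: the statement is the Claim_ definition above) =====
theorem sumaV_spec : Claim_equal_sumaV := by
  intro m _ hp
  unfold Spec_sumaV
  by_cases hm : m = []
  · subst hm; rfl
  · rw [aEq m, altEq m hm]
    set h := m.length with hh
    set w := (PySem.List.pyGetD m 0 []).length with hw
    apply List.ext_getElem
    · rw [grid_length, pvApply_length, List.length_replicate]
    · intro i h1 h2
      rw [grid_length] at h1
      have hw0 : 0 < w := by
        rcases Nat.eq_zero_or_pos w with h0 | h0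
        · rw [h0, Nat.mul_zero] at h1; omega
        · exact h0
      have hi : (i / w) * w + i % w = i := by
        rw [Nat.mul_comm]; exact Nat.div_add_mod i w
      have hf0 : i / w < h := by
        rw [Nat.div_lt_iff_lt_mul hw0]; omega
      have hc0 : i % w < w := Nat.mod_lt _ hw0
      rw [← List.getD_eq_getElem _ 0, ← List.getD_eq_getElem _ 0, ← hi,
        grid_getD _ _ _ _ _ hf0 hc0, B_getD m h w _ _ hf0 hc0,
        cell_match m _ _ hf0 hc0]
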